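-- pv_equiv track=rewrite | github.com/BenMarks-Projects-Account/Market_Analysis_Backend | BenTrade/backend/app/services/_deprecated_pipeline/pipeline_portfolio_policy_stage.py | derive_overall_outcome
-- ===== SOURCE A (Python) =====
-- from typing import Any, Callable
--
-- OUTCOME_ELIGIBLE = "eligible"
--
-- OUTCOME_ELIGIBLE_WITH_CAUTIONS = "eligible_with_cautions"
--
-- OUTCOME_RESTRICTED = "restricted"
--
-- OUTCOME_BLOCKED = "blocked"
--
-- CHECK_CAUTION = "caution"
--
-- CHECK_RESTRICT = "restrict"
--
-- CHECK_BLOCK = "block"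
--
-- CHECK_UNKNOWN = "unknown"
--
-- def derive_overall_outcome(checks: list[dict[str, Any]]) -> str:
--     """Derive the overall policy outcome from check results.
--
--     Deterministic derivation
--     ────────────────────────
--     1. If any check_status == "block" → blocked
--     2. If any check_status == "restrict" → restricted
--     3. If any check_status in ("caution", "unknown") → eligible_with_cautions
--     4. Otherwise → eligible
--
--     Parameters
--     ----------
--     checks : list[dict]
--         List of policy check results.
--
--     Returns
--     -------
--     str
--         One of OUTCOME_ELIGIBLE / OUTCOME_ELIGIBLE_WITH_CAUTIONS /
--         OUTCOME_RESTRICTED / OUTCOME_BLOCKED.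
--     """
--     statuses = [c.get("check_status") for c in checks]
--
--     if CHECK_BLOCK in statuses:
--         return OUTCOME_BLOCKED
--     if CHECK_RESTRICT in statuses:
--         return OUTCOME_RESTRICTED
--     if CHECK_CAUTION in statuses or CHECK_UNKNOWN in statuses:
--         return OUTCOME_ELIGIBLE_WITH_CAUTIONS
--     return OUTCOME_ELIGIBLE
-- ===== SOURCE B (Python) =====
-- _RANK = {"block": 3, "restrict": 2, "caution": 1, "unknown": 1}
--
--
-- def _outcome(rank):
--     if rank == 3:
--         return "blocked"
--     if rank == 2:
--         return "restricted"
--     if rank == 1: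
--         return "eligible_with_cautions"
--     return "eligible"
--
--
-- def derive_overall_outcome(checks):
--     rank = 0
--     for c in checks:
--         status = c.get("check_status")
--         rank = max(rank, _RANK.get(status, 0))
--     return _outcome(rank)
-- ===== Notes on version B (the rewrite author's own statement) =====
-- stated objective: alternative
-- what changed: Replaces A's four full membership scans over a materialised status list by a single fold that keeps the maximum severity rank (block=3, restrict=2, caution/unknown=1, other=0) and maps the final rank to the outcome string.
import Mathlib
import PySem

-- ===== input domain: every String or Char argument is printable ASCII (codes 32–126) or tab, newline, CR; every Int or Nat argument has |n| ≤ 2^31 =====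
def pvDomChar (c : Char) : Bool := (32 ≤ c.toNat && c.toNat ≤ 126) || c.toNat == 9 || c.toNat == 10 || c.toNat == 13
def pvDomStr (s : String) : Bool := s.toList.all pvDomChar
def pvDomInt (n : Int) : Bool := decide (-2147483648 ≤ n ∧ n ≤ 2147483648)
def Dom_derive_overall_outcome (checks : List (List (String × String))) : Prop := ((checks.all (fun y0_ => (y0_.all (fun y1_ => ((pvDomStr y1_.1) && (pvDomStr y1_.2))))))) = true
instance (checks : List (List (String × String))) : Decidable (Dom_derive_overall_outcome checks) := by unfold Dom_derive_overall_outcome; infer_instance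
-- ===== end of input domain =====

set_option maxRecDepth 4000

-- B replaces A's four membership scans over a materialised status list by a single
-- max-severity fold mapped back to the outcome string (alternative decomposition).

-- ===== PORT A =====
-- c.get("check_status") for an association-list dict: first-match lookup
def pvStatus (c : List (String × String)) : Option String :=
  (PySem.Dict.mk c).get? "check_status"

def derive_overall_outcome (checks : List (List (String × String))) : String :=
  let statuses := checks.map (fun c => pvStatus c)
  if (some "block") ∈ statuses then "blocked"
  else if (some "restrict") ∈ statuses then "restricted"
  else if (some "caution") ∈ statuses ∨ (some "unknown") ∈ statuses then "eligible_with_cautions"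
  else "eligible"

-- ===== PORT B =====
def pvRankTable : PySem.Dict String Nat :=
  PySem.Dict.mk [("block", 3), ("restrict", 2), ("caution", 1), ("unknown", 1)]

-- _RANK.get(status, 0); a None status never matches a string key, hence 0
def pvRank (st : Option String) : Nat :=
  match st with
  | some s => PySem.Dict.getD pvRankTable s 0
  | none => 0

def pvOutcome (rank : Nat) : String :=
  if rank = 3 then "blocked"
  else if rank = 2 then "restricted"
  else if rank = 1 then "eligible_with_cautions"
  else "eligible"

def derive_overall_outcome_alt (checks : List (List (String × String))) : String :=
  pvOutcome (checks.foldl (fun rank c => max rank (pvRank (pvStatus c))) 0)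

-- ===== PRECONDITION & SPEC =====
def Spec_derive_overall_outcome (checks : List (List (String × String))) (out : String) : Prop := out = derive_overall_outcome_alt checks
instance (checks : List (List (String × String))) (out : String) : Decidable (Spec_derive_overall_outcome checks out) := by unfold Spec_derive_overall_outcome; infer_instance

-- ===== CLAIM (what is proved, stated in full; the proofs are below) =====
def Claim_equal_derive_overall_outcome : Prop := ∀ (checks : List (List (String × String))), Dom_derive_overall_outcome checks → Spec_derive_overall_outcome checks (derive_overall_outcome checks)

-- ===== LEMMAS AND PROOFS =====

theorem pvRank_some (s : String) : pvRank (some s) =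
    if s = "block" then 3 else if s = "restrict" then 2
    else if s = "caution" then 1 else if s = "unknown" then 1 else 0 := by
  simp only [pvRank, pvRankTable, PySem.Dict.getD_eq_get?_getD, PySem.Dict.get?_mk_cons,
    beq_iff_eq]
  split_ifs <;> first | rfl | (subst_vars; simp_all)

theorem pvRank_le (st : Option String) : pvRank st ≤ 3 := by
  cases st with
  | none => simp [pvRank]
  | some s => rw [pvRank_some]; split_ifs <;> omega

theorem pvRank_ge3_iff (st : Option String) : 3 ≤ pvRank st ↔ st = some "block" := by
  cases st with
  | none => simp [pvRank]
  | some s => rw [pvRank_some]; split_ifs <;> simp_all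

theorem pvRank_ge2_iff (st : Option String) :
    2 ≤ pvRank st ↔ st = some "block" ∨ st = some "restrict" := by
  cases st with
  | none => simp [pvRank]
  | some s => rw [pvRank_some]; split_ifs <;> simp_all

theorem pvRank_ge1_iff (st : Option String) :
    1 ≤ pvRank st ↔ st = some "block" ∨ st = some "restrict" ∨
      st = some "caution" ∨ st = some "unknown" := by
  cases st with
  | none => simp [pvRank]
  | some s => rw [pvRank_some]; split_ifs <;> simp_all

theorem pvFoldl_max (l : List (List (String × String))) (r : Nat) :
    l.foldl (fun rank c => max rank (pvRank (pvStatus c))) r =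
      max r (l.foldl (fun rank c => max rank (pvRank (pvStatus c))) 0) := by
  induction l generalizing r with
  | nil => simp
  | cons c t ih =>
    rw [List.foldl_cons, List.foldl_cons, ih (max r _), ih (max 0 _)]
    omega

theorem pvFoldl_le (l : List (List (String × String))) :
    l.foldl (fun rank c => max rank (pvRank (pvStatus c))) 0 ≤ 3 := by
  induction l with
  | nil => simp
  | cons c t ih =>
    rw [List.foldl_cons, pvFoldl_max]
    have := pvRank_le (pvStatus c)
    omega

theorem le_pvFoldl_iff (k : Nat) (hk : 0 < k) (l : List (List (String × String))) :
    k ≤ l.foldl (fun rank c => max rank (pvRank (pvStatus c))) 0 ↔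
      ∃ c ∈ l, k ≤ pvRank (pvStatus c) := by
  induction l with
  | nil => simp; omega
  | cons c t ih =>
    rw [List.foldl_cons, pvFoldl_max]
    constructor
    · intro h
      by_cases hc : k ≤ pvRank (pvStatus c)
      · exact ⟨c, List.mem_cons_self, hc⟩
      · obtain ⟨d, hd, hkd⟩ := ih.mp (by omega)
        exact ⟨d, List.mem_cons_of_mem _ hd, hkd⟩
    · rintro ⟨d, hd, hkd⟩
      rcases List.mem_cons.mp hd with rfl | hd
      · omega
      · have := ih.mpr ⟨d, hd, hkd⟩; omega

-- ===== VERDICT (by name: the statement is the Claim_ definition above) =====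
theorem derive_overall_outcome_spec : Claim_equal_derive_overall_outcome := by
  intro checks _
  unfold Spec_derive_overall_outcome derive_overall_outcome derive_overall_outcome_alt
  simp only [List.mem_map]
  set m := checks.foldl (fun rank c => max rank (pvRank (pvStatus c))) 0 with hm
  have hle : m ≤ 3 := pvFoldl_le checks
  have e3 := le_pvFoldl_iff 3 (by omega) checks
  have e2 := le_pvFoldl_iff 2 (by omega) checks
  have e1 := le_pvFoldl_iff 1 (by omega) checks
  rw [← hm] at e3 e2 e1
  split_ifs with hA1 hA2 hA3
  · -- some check is "block"
    obtain ⟨c, hc, hs⟩ := hA1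
    have : 3 ≤ m := e3.mpr ⟨c, hc, (pvRank_ge3_iff _).mpr hs⟩
    have hv : m = 3 := by omega
    rw [hv]; rfl
  · -- no "block", some "restrict"
    obtain ⟨c, hc, hs⟩ := hA2
    have h2 : 2 ≤ m := e2.mpr ⟨c, hc, (pvRank_ge2_iff _).mpr (Or.inr hs)⟩
    have h3 : ¬ 3 ≤ m := by
      intro h
      obtain ⟨d, hd, hkd⟩ := e3.mp h
      exact hA1 ⟨d, hd, (pvRank_ge3_iff _).mp hkd⟩
    have hv : m = 2 := by omega
    rw [hv]; rfl
  · -- no "block"/"restrict", some "caution" or "unknown"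
    have h1 : 1 ≤ m := by
      rcases hA3 with ⟨c, hc, hs⟩ | ⟨c, hc, hs⟩
      · exact e1.mpr ⟨c, hc, (pvRank_ge1_iff _).mpr (by tauto)⟩
      · exact e1.mpr ⟨c, hc, (pvRank_ge1_iff _).mpr (by tauto)⟩
    have h2 : ¬ 2 ≤ m := by
      intro h
      obtain ⟨d, hd, hkd⟩ := e2.mp h
      rcases (pvRank_ge2_iff _).mp hkd with hs | hs
      · exact hA1 ⟨d, hd, hs⟩
      · exact hA2 ⟨d, hd, hs⟩
    have hv : m = 1 := by omega
    rw [hv]; rfl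
  · -- nothing relevant
    have h1 : ¬ 1 ≤ m := by
      intro h
      obtain ⟨d, hd, hkd⟩ := e1.mp h
      rcases (pvRank_ge1_iff _).mp hkd with hs | hs | hs | hs
      · exact hA1 ⟨d, hd, hs⟩
      · exact hA2 ⟨d, hd, hs⟩
      · exact hA3 (Or.inl ⟨d, hd, hs⟩)
      · exact hA3 (Or.inr ⟨d, hd, hs⟩)
    have hv : m = 0 := by omega
    rw [hv]; rfl
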